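-- pv_equiv track=rewrite | github.com/Vestenar/PythonProjects | venv/02_Codesignal/02_The Core/079_threeSplit.py | threeSplit
-- ===== SOURCE A (Python) =====
-- def threeSplit(a):
--     n = 0
--     sum_thrd = sum(a)//3
--     sum1 = 0
--     for i in range(len(a)-2):
--         sum1 += a[i]
--         if sum1 == sum_thrd:
--             sum2 = 0
--             for j in range(i+1,len(a)-1):
--                 sum2 += a[j]
--                 if sum2 == sum_thrd:
--                     n+=1
--     return n
-- ===== SOURCE B (Python) =====
-- def threeSplit(a):
--     n = len(a)
--     if n < 3:
--         return 0
--     t = sum(a) // 3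
--     res = cnt = pref = 0
--     for j in range(1, n - 1):
--         pref += a[j - 1]
--         if pref == t:
--             cnt += 1
--         if pref + a[j] == 2 * t:
--             res += cnt
--     return res
-- ===== Notes on version B (the rewrite author's own statement) =====
-- stated objective: alternative
-- what changed: Replaced A's nested scan (for every valid first cut, re-scan the remainder for second cuts) by a single prefix-sum pass that keeps a running count of valid first cuts and adds it at every valid second cut; worst-case O(n) instead of O(n^2), though not measurably faster on typical inputs where A's inner loop rarely fires.
import Mathlib
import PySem

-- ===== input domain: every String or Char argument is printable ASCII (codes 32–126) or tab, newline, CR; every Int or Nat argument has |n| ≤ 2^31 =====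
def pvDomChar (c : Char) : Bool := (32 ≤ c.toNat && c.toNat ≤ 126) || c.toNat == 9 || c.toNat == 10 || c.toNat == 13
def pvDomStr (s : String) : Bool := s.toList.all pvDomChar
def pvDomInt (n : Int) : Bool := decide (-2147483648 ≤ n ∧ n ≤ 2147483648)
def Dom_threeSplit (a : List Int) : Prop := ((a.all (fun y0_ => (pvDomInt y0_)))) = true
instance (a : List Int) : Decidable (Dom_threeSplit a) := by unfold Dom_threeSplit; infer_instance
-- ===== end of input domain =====

-- B replaces A's conditional nested rescans by a single prefix-sum pass that keeps a
-- running count of valid first cuts and adds it at each valid second cut (objective: alternative).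


-- ===== PORT A =====
def threeSplit (a : List Int) : Int :=
  let sum_thrd := PySem.Int.floordiv a.sum 3
  let r := (PySem.List.pyRange 0 ((a.length : Int) - 2) 1).foldl
    (fun (st : Int × Int) i =>
      let sum1 := st.2 + PySem.List.pyGetD a i 0
      if sum1 = sum_thrd then
        let inner := (PySem.List.pyRange (i + 1) ((a.length : Int) - 1) 1).foldl
          (fun (st2 : Int × Int) j =>
            let sum2 := st2.2 + PySem.List.pyGetD a j 0
            (if sum2 = sum_thrd then st2.1 + 1 else st2.1, sum2))
          (st.1, 0)
        (inner.1, sum1)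
      else (st.1, sum1))
    (0, 0)
  r.1

-- ===== PORT B =====
def threeSplit_alt (a : List Int) : Int :=
  let n : Int := a.length
  if n < 3 then 0
  else
    let t := PySem.Int.floordiv a.sum 3
    let st := (PySem.List.pyRange 1 (n - 1) 1).foldl
      (fun (s : Int × Int × Int) j =>
        let pref := s.2.2 + PySem.List.pyGetD a (j - 1) 0
        let cnt := if pref = t then s.2.1 + 1 else s.2.1
        let res := if pref + PySem.List.pyGetD a j 0 = 2 * t then s.1 + cnt else s.1
        (res, cnt, pref))
      (0, 0, 0)
    st.1

-- ===== PRECONDITION & SPEC =====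
def Spec_threeSplit (a : List Int) (out : Int) : Prop := out = threeSplit_alt a
instance (a : List Int) (out : Int) : Decidable (Spec_threeSplit a out) := by unfold Spec_threeSplit; infer_instance

-- ===== CLAIM (what is proved, stated in full; the proofs are below) =====
def Claim_equal_threeSplit : Prop := ∀ (a : List Int), Dom_threeSplit a → Spec_threeSplit a (threeSplit a)

-- ===== LEMMAS AND PROOFS =====

/-- Sum of `f` over the integer interval `[lo, hi)`. -/
def Srange (lo hi : Int) (f : Int → Int) : Int := ((PySem.List.pyRange lo hi 1).map f).sum

/-- Prefix sum of the first `k` elements (`k` clamped). -/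
def pvPref (a : List Int) (k : Int) : Int := (a.take k.toNat).sum

theorem Srange_nil (lo hi : Int) (f : Int → Int) (h : hi ≤ lo) : Srange lo hi f = 0 := by
  simp [Srange, PySem.List.pyRange_one_eq_nil h]

theorem Srange_succ (lo hi : Int) (f : Int → Int) (h : lo ≤ hi) :
    Srange lo (hi + 1) f = Srange lo hi f + f hi := by
  unfold Srange
  rw [PySem.List.pyRange_one_succ_right h]
  simp

theorem Srange_cons (lo hi : Int) (f : Int → Int) (h : lo < hi) :
    Srange lo hi f = f lo + Srange (lo + 1) hi f := by
  simp [Srange, PySem.List.pyRange_one_cons h]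

theorem Srange_congr (lo hi : Int) (f g : Int → Int)
    (h : ∀ x, lo ≤ x → x < hi → f x = g x) : Srange lo hi f = Srange lo hi g := by
  unfold Srange
  congr 1
  apply List.map_congr_left
  intro x hx
  rw [PySem.List.mem_pyRange_one] at hx
  exact h x hx.1 hx.2

theorem Srange_add (lo hi : Int) (f g : Int → Int) :
    Srange lo hi (fun x => f x + g x) = Srange lo hi f + Srange lo hi g := by
  simp [Srange]

theorem Srange_zero (lo hi : Int) : Srange lo hi (fun _ => (0 : Int)) = 0 := by
  simp [Srange]

theorem Srange_shift (lo hi : Int) (f : Int → Int) :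
    Srange lo hi (fun x => f (x + 1)) = Srange (lo + 1) (hi + 1) f := by
  simp only [Srange, PySem.List.pyRange_one]
  have : hi - lo = hi + 1 - (lo + 1) := by ring
  rw [← this, List.map_map, List.map_map]
  congr 1
  apply List.map_congr_left
  intro k _
  simp only [Function.comp]
  congr 1
  ring

theorem pvPref_zero (a : List Int) : pvPref a 0 = 0 := by simp [pvPref]

theorem pvPref_succ (a : List Int) (j : Int) (h : 0 ≤ j) :
    pvPref a (j + 1) = pvPref a j + PySem.List.pyGetD a j 0 := by
  obtain ⟨m, rfl⟩ : ∃ m : Nat, (m : Int) = j := ⟨j.toNat, Int.toNat_of_nonneg h⟩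
  rw [PySem.List.pyGetD_natCast]
  show (a.take ((m : Int) + 1).toNat).sum = (a.take ((m : Int)).toNat).sum + a.getD m 0
  have h1 : ((m : Int) + 1).toNat = m + 1 := by omega
  have h2 : ((m : Int)).toNat = m := by omega
  rw [h1, h2]
  by_cases hm : m < a.length
  · rw [List.sum_take_succ a m hm]
    simp [List.getD, List.getElem?_eq_getElem hm]
  · rw [List.take_of_length_le (Nat.le_of_not_lt hm),
      List.take_of_length_le (by omega : a.length ≤ m + 1)]
    simp [List.getD, List.getElem?_eq_none_iff.mpr (Nat.le_of_not_lt hm)]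

/-- A's inner loop: a running-sum scan counting hits of `t`, for any prefix function `p`. -/
theorem innerA_char (g p : Int → Int) (t : Int)
    (hp : ∀ j, 0 ≤ j → p (j + 1) = p j + g j) :
    ∀ (k : Nat) (lo c : Int), 0 ≤ lo →
    ((PySem.List.pyRange lo (lo + k) 1).foldl
      (fun (st : Int × Int) j =>
        (if st.2 + g j = t then st.1 + 1 else st.1, st.2 + g j)) (c, p lo))
    = (c + Srange lo (lo + k) (fun j => if p (j + 1) = t then 1 else 0), p (lo + k)) := by
  intro k
  induction k with
  | zero =>
    intro lo c h0
    have h1 : lo + ((0 : Nat) : Int) = lo := by push_cast; ring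
    rw [h1, PySem.List.pyRange_one_eq_nil (le_refl lo), Srange_nil _ _ _ (le_refl lo)]
    simp
  | succ m ih =>
    intro lo c h0
    rw [PySem.List.pyRange_one_cons (by push_cast; omega : lo < lo + ((m + 1 : Nat) : Int))]
    simp only [List.foldl_cons]
    have hstep : p lo + g lo = p (lo + 1) := (hp lo h0).symm
    rw [hstep]
    have harr : lo + ((m + 1 : Nat) : Int) = (lo + 1) + (m : Int) := by push_cast; omega
    rw [harr, ih (lo + 1) _ (by omega)]
    have hsplit := Srange_cons lo (lo + 1 + (m : Int))
      (fun j => if p (j + 1) = t then 1 else 0) (by omega)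
    simp only [] at hsplit
    refine Prod.ext ?_ rfl
    rw [hsplit]; split_ifs <;> ring

/-- Wrapper for arbitrary upper bound. -/
theorem innerA_fst (g p : Int → Int) (t : Int)
    (hp : ∀ j, 0 ≤ j → p (j + 1) = p j + g j) (lo hi c : Int) (h0 : 0 ≤ lo) :
    ((PySem.List.pyRange lo hi 1).foldl
      (fun (st : Int × Int) j =>
        (if st.2 + g j = t then st.1 + 1 else st.1, st.2 + g j)) (c, p lo)).1
    = c + Srange lo hi (fun j => if p (j + 1) = t then 1 else 0) := by
  by_cases h : lo ≤ hi
  · have : hi = lo + ((hi - lo).toNat : Int) := by omega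
    rw [this, innerA_char g p t hp _ lo c h0]
  · rw [PySem.List.pyRange_one_eq_nil (by omega), Srange_nil _ _ _ (by omega)]
    simp

/-- Variant of `innerA_fst` whose initial running sum is the literal `0`. -/
theorem innerA_fst0 (g p0 : Int → Int) (t : Int)
    (hp : ∀ j, 0 ≤ j → p0 (j + 1) = p0 j + g j) (lo hi c : Int) (h0 : 0 ≤ lo)
    (hz : p0 lo = 0) :
    ((PySem.List.pyRange lo hi 1).foldl
      (fun (st : Int × Int) j =>
        (if st.2 + g j = t then st.1 + 1 else st.1, st.2 + g j)) (c, 0)).1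
    = c + Srange lo hi (fun j => if p0 (j + 1) = t then 1 else 0) := by
  conv_lhs => rw [show (0 : Int) = p0 lo from hz.symm]
  exact innerA_fst g p0 t hp lo hi c h0

/-- A's outer loop characterised as a double range sum, for `p = pvPref a`. -/
theorem outerA_char (a : List Int) (t : Int) :
    ∀ (k : Nat) (lo c : Int), 0 ≤ lo →
    ((PySem.List.pyRange lo (lo + k) 1).foldl
      (fun (st : Int × Int) i =>
        let sum1 := st.2 + PySem.List.pyGetD a i 0
        if sum1 = t then
          let inner := (PySem.List.pyRange (i + 1) ((a.length : Int) - 1) 1).foldl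
            (fun (st2 : Int × Int) j =>
              let sum2 := st2.2 + PySem.List.pyGetD a j 0
              (if sum2 = t then st2.1 + 1 else st2.1, sum2))
            (st.1, 0)
          (inner.1, sum1)
        else (st.1, sum1)) (c, pvPref a lo))
    = (c + Srange lo (lo + k)
        (fun i => if pvPref a (i + 1) = t
          then Srange (i + 1) ((a.length : Int) - 1)
            (fun j => if pvPref a (j + 1) - pvPref a (i + 1) = t then 1 else 0)
          else 0),
       pvPref a (lo + k)) := by
  intro k
  induction k with
  | zero =>
    intro lo c h0
    have h1 : lo + ((0 : Nat) : Int) = lo := by push_cast; ring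
    rw [h1, PySem.List.pyRange_one_eq_nil (le_refl lo), Srange_nil _ _ _ (le_refl lo)]
    simp
  | succ m ih =>
    intro lo c h0
    rw [PySem.List.pyRange_one_cons (by push_cast; omega : lo < lo + ((m + 1 : Nat) : Int))]
    simp only [List.foldl_cons]
    have hstep : pvPref a lo + PySem.List.pyGetD a lo 0 = pvPref a (lo + 1) :=
      (pvPref_succ a lo h0).symm
    rw [hstep]
    have harr : lo + ((m + 1 : Nat) : Int) = (lo + 1) + (m : Int) := by push_cast; omega
    have hinner : ((PySem.List.pyRange (lo + 1) ((a.length : Int) - 1) 1).foldl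
        (fun (st2 : Int × Int) j =>
          (if st2.2 + PySem.List.pyGetD a j 0 = t then st2.1 + 1 else st2.1,
            st2.2 + PySem.List.pyGetD a j 0)) (c, 0)).1
        = c + Srange (lo + 1) ((a.length : Int) - 1)
            (fun j => if pvPref a (j + 1) - pvPref a (lo + 1) = t then 1 else 0) :=
      innerA_fst0 (fun j => PySem.List.pyGetD a j 0)
        (fun j => pvPref a j - pvPref a (lo + 1)) t
        (fun j hj => by simp only []; rw [pvPref_succ a j hj]; ring)
        (lo + 1) ((a.length : Int) - 1) c (by omega) (by simp)
    by_cases hc : pvPref a (lo + 1) = t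
    · rw [if_pos hc, hinner, harr, ih (lo + 1) _ (by omega)]
      have hsplit := Srange_cons lo (lo + 1 + (m : Int))
        (fun i => if pvPref a (i + 1) = t
          then Srange (i + 1) ((a.length : Int) - 1)
            (fun j => if pvPref a (j + 1) - pvPref a (i + 1) = t then 1 else 0)
          else 0) (by omega)
      simp only [] at hsplit
      refine Prod.ext ?_ rfl
      rw [hsplit, if_pos hc]; ring
    · rw [if_neg hc, harr, ih (lo + 1) _ (by omega)]
      have hsplit := Srange_cons lo (lo + 1 + (m : Int))
        (fun i => if pvPref a (i + 1) = t
          then Srange (i + 1) ((a.length : Int) - 1)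
            (fun j => if pvPref a (j + 1) - pvPref a (i + 1) = t then 1 else 0)
          else 0) (by omega)
      simp only [] at hsplit
      refine Prod.ext ?_ rfl
      rw [hsplit, if_neg hc]; ring

/-- B's loop characterised: running count of first cuts, summed at valid second cuts. -/
theorem loopB_char (a : List Int) (t : Int) :
    ∀ (k : Nat) (lo res : Int), 1 ≤ lo →
    ((PySem.List.pyRange lo (lo + k) 1).foldl
      (fun (s : Int × Int × Int) j =>
        let pref := s.2.2 + PySem.List.pyGetD a (j - 1) 0
        let cnt := if pref = t then s.2.1 + 1 else s.2.1
        let res := if pref + PySem.List.pyGetD a j 0 = 2 * t then s.1 + cnt else s.1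
        (res, cnt, pref))
      (res, Srange 1 lo (fun u => if pvPref a u = t then 1 else 0), pvPref a (lo - 1)))
    = (res + Srange lo (lo + k)
        (fun v => if pvPref a (v + 1) = 2 * t
          then Srange 1 (v + 1) (fun u => if pvPref a u = t then 1 else 0) else 0),
       Srange 1 (lo + k) (fun u => if pvPref a u = t then 1 else 0),
       pvPref a (lo + k - 1)) := by
  intro k
  induction k with
  | zero =>
    intro lo res h1
    have he : lo + ((0 : Nat) : Int) = lo := by push_cast; ring
    rw [he, PySem.List.pyRange_one_eq_nil (le_refl lo), Srange_nil _ _ _ (le_refl lo)]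
    simp
  | succ m ih =>
    intro lo res h1
    rw [PySem.List.pyRange_one_cons (by push_cast; omega : lo < lo + ((m + 1 : Nat) : Int))]
    simp only [List.foldl_cons]
    have hpref : pvPref a (lo - 1) + PySem.List.pyGetD a (lo - 1) 0 = pvPref a lo := by
      have h := pvPref_succ a (lo - 1) (by omega)
      rw [show lo - 1 + 1 = lo by ring] at h
      exact h.symm
    rw [hpref]
    have hcnt : (if pvPref a lo = t
        then Srange 1 lo (fun u => if pvPref a u = t then 1 else 0) + 1
        else Srange 1 lo (fun u => if pvPref a u = t then 1 else 0))
        = Srange 1 (lo + 1) (fun u => if pvPref a u = t then 1 else 0) := by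
      rw [Srange_succ 1 lo _ (by omega)]
      split_ifs <;> ring
    rw [hcnt]
    have hp2 : pvPref a lo + PySem.List.pyGetD a lo 0 = pvPref a (lo + 1) :=
      (pvPref_succ a lo (by omega)).symm
    rw [hp2]
    have harr : lo + ((m + 1 : Nat) : Int) = (lo + 1) + (m : Int) := by push_cast; omega
    have hres : (if pvPref a (lo + 1) = 2 * t
        then res + Srange 1 (lo + 1) (fun u => if pvPref a u = t then 1 else 0)
        else res)
        = res + (if pvPref a (lo + 1) = 2 * t
            then Srange 1 (lo + 1) (fun u => if pvPref a u = t then 1 else 0) else 0) := by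
      split_ifs <;> ring
    rw [hres]
    rw [show pvPref a lo = pvPref a (lo + 1 - 1) by norm_num]
    rw [harr, ih (lo + 1) _ (by omega)]
    have hsplit := Srange_cons lo (lo + 1 + (m : Int))
      (fun v => if pvPref a (v + 1) = 2 * t
        then Srange 1 (v + 1) (fun u => if pvPref a u = t then 1 else 0) else 0) (by omega)
    simp only [] at hsplit
    refine Prod.ext ?_ (Prod.ext rfl rfl)
    rw [hsplit]; ring

/-- The triangle swap: summing over first cut then second equals the reverse order. -/
theorem swap_sum (p : Int → Int) (t : Int) (lo : Int) :
    ∀ (k : Nat),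
    Srange lo (lo + k) (fun u => if p u = t
        then Srange (u + 1) (lo + k) (fun v => if p v = 2 * t then 1 else 0) else 0)
    = Srange lo (lo + k) (fun w => if p w = 2 * t
        then Srange lo w (fun u => if p u = t then 1 else 0) else 0) := by
  intro k
  induction k with
  | zero => rw [Srange_nil _ _ _ (by omega), Srange_nil _ _ _ (by omega)]
  | succ m ih =>
    have hb : lo + ((m + 1 : Nat) : Int) = (lo + (m : Int)) + 1 := by push_cast; ring
    set b := lo + (m : Int) with hbdef
    rw [hb]
    rw [Srange_succ lo b _ (by omega), Srange_succ lo b _ (by omega)]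
    have hLsplit : Srange lo b (fun u => if p u = t
        then Srange (u + 1) (b + 1) (fun v => if p v = 2 * t then 1 else 0) else 0)
        = Srange lo b (fun u => if p u = t
            then Srange (u + 1) b (fun v => if p v = 2 * t then 1 else 0) else 0)
          + Srange lo b (fun u => if p u = t then (if p b = 2 * t then 1 else 0) else 0) := by
      rw [← Srange_add]
      apply Srange_congr
      intro x hx1 hx2
      rw [Srange_succ (x + 1) b _ (by omega)]
      split_ifs <;> ring
    rw [hLsplit]
    rw [show (if p b = t
        then Srange (b + 1) (b + 1) (fun v => if p v = 2 * t then 1 else 0) else 0) = 0 by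
      rw [Srange_nil _ _ _ (by omega)]; split_ifs <;> rfl]
    have hcomm : Srange lo b (fun u => if p u = t then (if p b = 2 * t then (1:Int) else 0) else 0)
        = if p b = 2 * t then Srange lo b (fun u => if p u = t then 1 else 0) else 0 := by
      by_cases hpb : p b = 2 * t
      · refine (Srange_congr lo b _ (fun u => if p u = t then 1 else 0)
          (fun x _ _ => by simp [hpb])).trans (if_pos hpb).symm
      · refine ((Srange_congr lo b _ (fun _ => (0 : Int))
          (fun x _ _ => by simp [hpb])).trans (Srange_zero lo b)).trans (if_neg hpb).symm
    rw [hcomm, ih]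
    ring

theorem eqn_small (a : List Int) (h : (a.length : Int) < 3) :
    threeSplit a = threeSplit_alt a := by
  unfold threeSplit threeSplit_alt
  simp only [if_pos h]
  rw [PySem.List.pyRange_one_eq_nil (by omega : (a.length : Int) - 2 ≤ 0)]
  rfl

theorem eqn_main (a : List Int) (h : 3 ≤ (a.length : Int)) :
    threeSplit a = threeSplit_alt a := by
  -- A's value
  have hA : threeSplit a
      = Srange 0 (((a.length : Int)) - 2) (fun i => if pvPref a (i + 1) = PySem.Int.floordiv a.sum 3
          then Srange (i + 1) (((a.length : Int)) - 1)
            (fun j => if pvPref a (j + 1) - pvPref a (i + 1) = PySem.Int.floordiv a.sum 3 then 1 else 0) else 0) := by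
    unfold threeSplit
    simp only []
    rw [show ((0 : Int), (0 : Int)) = ((0 : Int), pvPref a 0) by rw [pvPref_zero]]
    rw [show (a.length : Int) - 2 = 0 + ((((a.length : Int) - 2).toNat : Int)) by omega]
    rw [outerA_char a (PySem.Int.floordiv a.sum 3) ((((a.length : Int)) - 2).toNat) 0 0 (le_refl 0)]
    simp
  -- B's value
  have hB : threeSplit_alt a
      = Srange 1 (((a.length : Int)) - 1) (fun v => if pvPref a (v + 1) = 2 * PySem.Int.floordiv a.sum 3
          then Srange 1 (v + 1) (fun u => if pvPref a u = PySem.Int.floordiv a.sum 3 then 1 else 0) else 0) := by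
    unfold threeSplit_alt
    simp only []
    rw [if_neg (by omega : ¬ ((a.length : Int) < 3))]
    rw [show ((0 : Int), (0 : Int), (0 : Int))
        = ((0 : Int), Srange 1 1 (fun u => if pvPref a u = PySem.Int.floordiv a.sum 3 then 1 else 0),
            pvPref a (1 - 1)) by
      rw [Srange_nil _ _ _ (le_refl 1), show (1 : Int) - 1 = 0 by ring, pvPref_zero]]
    rw [show (a.length : Int) - 1 = 1 + ((((a.length : Int) - 2).toNat : Int)) by omega]
    rw [loopB_char a (PySem.Int.floordiv a.sum 3) ((((a.length : Int)) - 2).toNat) 1 0 (le_refl 1)]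
    simp
  -- rewrite A: inner condition uses pvPref a (i+1) = PySem.Int.floordiv a.sum 3
  have hA2 : threeSplit a
      = Srange 0 (((a.length : Int)) - 2) (fun i => if pvPref a (i + 1) = PySem.Int.floordiv a.sum 3
          then Srange (i + 1) (((a.length : Int)) - 1)
            (fun j => if pvPref a (j + 1) = 2 * PySem.Int.floordiv a.sum 3 then 1 else 0) else 0) := by
    rw [hA]
    apply Srange_congr
    intro i _ _
    by_cases hc : pvPref a (i + 1) = PySem.Int.floordiv a.sum 3
    · simp only [hc, if_true]
      apply Srange_congr
      intro j _ _
      split_ifs with h1 h2 <;> omega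
    · simp only [hc, if_false]
  -- reindex A's inner sum to v = j + 1, then outer to u = i + 1
  have hA3 : threeSplit a
      = Srange 1 (((a.length : Int)) - 1) (fun u => if pvPref a u = PySem.Int.floordiv a.sum 3
          then Srange (u + 1) ((a.length : Int)) (fun v => if pvPref a v = 2 * PySem.Int.floordiv a.sum 3 then 1 else 0) else 0) := by
    rw [hA2]
    have : ∀ i : Int, (if pvPref a (i + 1) = PySem.Int.floordiv a.sum 3
        then Srange (i + 1) (((a.length : Int)) - 1) (fun j => if pvPref a (j + 1) = 2 * PySem.Int.floordiv a.sum 3 then 1 else 0) else 0)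
        = (fun u => if pvPref a u = PySem.Int.floordiv a.sum 3
            then Srange (u + 1) ((a.length : Int)) (fun v => if pvPref a v = 2 * PySem.Int.floordiv a.sum 3 then 1 else 0) else 0) (i + 1) := by
      intro i
      simp only []
      congr 1
      rw [Srange_shift (i + 1) (((a.length : Int)) - 1) (fun v => if pvPref a v = 2 * PySem.Int.floordiv a.sum 3 then 1 else 0)]
      rw [show ((a.length : Int)) - 1 + 1 = ((a.length : Int)) by ring]
    rw [Srange_congr 0 (((a.length : Int)) - 2) _ _ (fun x _ _ => this x)]
    rw [Srange_shift 0 (((a.length : Int)) - 2)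
      (fun u => if pvPref a u = PySem.Int.floordiv a.sum 3
        then Srange (u + 1) ((a.length : Int))
          (fun v => if pvPref a v = 2 * PySem.Int.floordiv a.sum 3 then 1 else 0) else 0)]
    rw [show (0 : Int) + 1 = 1 by ring, show ((a.length : Int)) - 2 + 1 = ((a.length : Int)) - 1 by ring]
  -- extend A's outer sum to [1, ((a.length : Int))): the added term at ((a.length : Int)) - 1 is 0
  have hA4 : threeSplit a
      = Srange 1 ((a.length : Int)) (fun u => if pvPref a u = PySem.Int.floordiv a.sum 3
          then Srange (u + 1) ((a.length : Int)) (fun v => if pvPref a v = 2 * PySem.Int.floordiv a.sum 3 then 1 else 0) else 0) := by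
    rw [hA3]
    rw [show ((a.length : Int)) = (((a.length : Int)) - 1) + 1 by ring,
      Srange_succ 1 (((a.length : Int)) - 1) _ (by omega)]
    rw [show ((a.length : Int)) - 1 + 1 = ((a.length : Int)) by ring]
    rw [show (if pvPref a (((a.length : Int)) - 1) = PySem.Int.floordiv a.sum 3
        then Srange ((a.length : Int)) ((a.length : Int)) (fun v => if pvPref a v = 2 * PySem.Int.floordiv a.sum 3 then 1 else 0) else 0) = 0 by
      rw [Srange_nil _ _ _ (by omega)]; split_ifs <;> rfl]
    ring
  -- reindex B to w = v + 1 and extend down to 1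
  have hB2 : threeSplit_alt a
      = Srange 1 ((a.length : Int)) (fun w => if pvPref a w = 2 * PySem.Int.floordiv a.sum 3
          then Srange 1 w (fun u => if pvPref a u = PySem.Int.floordiv a.sum 3 then 1 else 0) else 0) := by
    rw [hB]
    have hsh : Srange 1 (((a.length : Int)) - 1)
        (fun v => if pvPref a (v + 1) = 2 * PySem.Int.floordiv a.sum 3
          then Srange 1 (v + 1) (fun u => if pvPref a u = PySem.Int.floordiv a.sum 3 then 1 else 0) else 0)
        = Srange (1 + 1) (((a.length : Int)) - 1 + 1)
          (fun w => if pvPref a w = 2 * PySem.Int.floordiv a.sum 3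
            then Srange 1 w (fun u => if pvPref a u = PySem.Int.floordiv a.sum 3 then 1 else 0) else 0) :=
      Srange_shift 1 (((a.length : Int)) - 1)
        (fun w => if pvPref a w = 2 * PySem.Int.floordiv a.sum 3
          then Srange 1 w (fun u => if pvPref a u = PySem.Int.floordiv a.sum 3 then 1 else 0) else 0)
    rw [hsh]
    rw [show ((a.length : Int)) - 1 + 1 = ((a.length : Int)) by ring, show (1 : Int) + 1 = 2 by ring]
    rw [Srange_cons 1 ((a.length : Int)) (fun w => if pvPref a w = 2 * PySem.Int.floordiv a.sum 3
      then Srange 1 w (fun u => if pvPref a u = PySem.Int.floordiv a.sum 3 then 1 else 0) else 0) (by omega)]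
    rw [show (if pvPref a 1 = 2 * PySem.Int.floordiv a.sum 3
        then Srange 1 1 (fun u => if pvPref a u = PySem.Int.floordiv a.sum 3 then 1 else 0) else 0) = 0 by
      rw [Srange_nil _ _ _ (le_refl 1)]; split_ifs <;> rfl]
    rw [show (1 : Int) + 1 = 2 by ring]
    ring
  rw [hA4, hB2]
  have hk : ((a.length : Int)) = 1 + ((((a.length : Int)) - 1).toNat : Int) := by omega
  rw [hk]
  exact swap_sum (pvPref a) (PySem.Int.floordiv a.sum 3) 1 (((a.length : Int) - 1).toNat)

-- ===== VERDICT (by name: the statement is the Claim_ definition above) =====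
theorem threeSplit_spec : Claim_equal_threeSplit := by
  intro a _
  unfold Spec_threeSplit
  by_cases h : (a.length : Int) < 3
  · exact eqn_small a h
  · exact eqn_main a (by omega)
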